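-- pv_equiv track=rewrite | github.com/script-free250/factestttttttttt | analyzer.py | analyze_streaks
-- ===== SOURCE A (Python) =====
-- def analyze_streaks(history, threshold):
--     """
--     يحلل تكرار حدوث قيم متتالية تحت حد معين.
--     """
--     if not history:
--         return 0, 0
--
--     max_streak = 0
--     current_streak = 0
--     for value in history:
--         if value < threshold:
--             current_streak += 1
--         else:
--             if current_streak > max_streak:
--                 max_streak = current_streak
--             current_streak = 0
--     # التحقق مرة أخرى في النهاية
--     if current_streak > max_streak:
--         max_streak = current_streak
--
--     # حساب السلسلة الحالية
--     current_low_streak = 0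
--     for value in reversed(history):
--         if value < threshold:
--             current_low_streak += 1
--         else:
--             break
--
--     return max_streak, current_low_streak
-- ===== SOURCE B (Python) =====
-- def analyze_streaks(history, threshold):
--     max_streak = 0
--     current = 0
--     for value in history:
--         current = current + 1 if value < threshold else 0
--         if current > max_streak:
--             max_streak = current
--     return max_streak, current
-- ===== Notes on version B (the rewrite author's own statement) =====
-- stated objective: simpler
-- what changed: B is one Kadane-style pass that keeps the running maximum up to date on every step, so A's post-loop fix-up and its entire second reversed() scan disappear; the final current streak is already the trailing below-threshold streak.
import Mathlib
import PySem

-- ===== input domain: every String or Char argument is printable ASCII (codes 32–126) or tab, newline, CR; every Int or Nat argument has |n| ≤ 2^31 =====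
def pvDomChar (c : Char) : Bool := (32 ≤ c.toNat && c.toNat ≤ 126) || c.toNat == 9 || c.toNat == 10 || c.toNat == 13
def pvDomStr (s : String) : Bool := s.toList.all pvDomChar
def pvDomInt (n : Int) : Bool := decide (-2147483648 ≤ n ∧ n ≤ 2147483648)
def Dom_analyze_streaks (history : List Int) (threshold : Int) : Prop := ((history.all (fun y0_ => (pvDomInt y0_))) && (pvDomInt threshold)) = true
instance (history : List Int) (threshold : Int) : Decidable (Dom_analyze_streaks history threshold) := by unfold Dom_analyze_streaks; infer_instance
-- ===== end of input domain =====

-- B replaces A's two scans (fold + reversed() trailing scan) by one pass whose running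
-- maximum is updated every step; the final current streak is the trailing streak. Objective: simpler.

-- ===== PORT A =====
-- first loop of A: state (max_streak, current_streak)
def pvFoldA (threshold : Int) (s : Int × Int) (value : Int) : Int × Int :=
  if value < threshold then (s.1, s.2 + 1)
  else ((if s.2 > s.1 then s.2 else s.1), 0)

-- second loop of A: count over reversed(history), stopping at the first value ≥ threshold
def pvTrail (threshold : Int) : List Int → Int
  | [] => 0
  | value :: rest => if value < threshold then 1 + pvTrail threshold rest else 0

def analyze_streaks (history : List Int) (threshold : Int) : Int × Int :=
  if history = [] then (0, 0)
  else
    let s := history.foldl (pvFoldA threshold) (0, 0)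
    let max_streak := if s.2 > s.1 then s.2 else s.1
    (max_streak, pvTrail threshold history.reverse)

-- ===== PORT B =====
def pvFoldB (threshold : Int) (s : Int × Int) (value : Int) : Int × Int :=
  let current := if value < threshold then s.2 + 1 else 0
  ((if current > s.1 then current else s.1), current)

def analyze_streaks_alt (history : List Int) (threshold : Int) : Int × Int :=
  history.foldl (pvFoldB threshold) (0, 0)

-- ===== PRECONDITION & SPEC =====
def Spec_analyze_streaks (history : List Int) (threshold : Int) (out : Int × Int) : Prop := out = analyze_streaks_alt history threshold
instance (history : List Int) (threshold : Int) (out : Int × Int) : Decidable (Spec_analyze_streaks history threshold out) := by unfold Spec_analyze_streaks; infer_instance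

-- ===== CLAIM (what is proved, stated in full; the proofs are below) =====
def Claim_equal_analyze_streaks : Prop := ∀ (history : List Int) (threshold : Int), Dom_analyze_streaks history threshold → Spec_analyze_streaks history threshold (analyze_streaks history threshold)

-- ===== LEMMAS AND PROOFS =====

-- B's fold state is A's fold state with the running maximum already folded in.
theorem foldB_eq_foldA (t : Int) (l : List Int) :
    ∀ (m c : Int), 0 ≤ m → 0 ≤ c →
      l.foldl (pvFoldB t) (max m c, c) =
        ((max (l.foldl (pvFoldA t) (m, c)).1 (l.foldl (pvFoldA t) (m, c)).2),
          (l.foldl (pvFoldA t) (m, c)).2) := by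
  induction l with
  | nil => intro m c hm hc; simp
  | cons v l ih =>
    intro m c hm hc
    by_cases hv : v < t
    · have h1 : pvFoldB t (max m c, c) v = (max m (c + 1), c + 1) := by
        simp [pvFoldB, hv]; omega
      have h2 : pvFoldA t (m, c) v = (m, c + 1) := by simp [pvFoldA, hv]
      simp only [List.foldl_cons, h1, h2]
      exact ih m (c + 1) hm (by omega)
    · have h1 : pvFoldB t (max m c, c) v = (max (max m c) 0, 0) := by
        simp [pvFoldB, hv]; omega
      have h2 : pvFoldA t (m, c) v = (max m c, 0) := by
        simp [pvFoldA, hv]; omega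
      simp only [List.foldl_cons, h1, h2]
      exact ih (max m c) 0 (by omega) (by omega)

-- the current streak after A's fold equals the trailing count over the reversed list
theorem foldA_snd_eq_trail (t : Int) (l : List Int) :
    (l.foldl (pvFoldA t) (0, 0)).2 = pvTrail t l.reverse := by
  induction l using List.reverseRecOn with
  | nil => simp [pvTrail]
  | append_singleton l v ih =>
    by_cases hv : v < t
    · simp [List.foldl_append, pvFoldA, pvTrail, hv, ih]; omega
    · simp [List.foldl_append, pvFoldA, pvTrail, hv]

-- ===== VERDICT (by name: the statement is the Claim_ definition above) =====
theorem analyze_streaks_spec : Claim_equal_analyze_streaks := by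
  intro history threshold _
  unfold Spec_analyze_streaks analyze_streaks analyze_streaks_alt
  by_cases h : history = []
  · simp [h]
  · have key := foldB_eq_foldA threshold history 0 0 le_rfl le_rfl
    have trail := foldA_snd_eq_trail threshold history
    simp only [h, if_false]
    rw [show (max (0:Int) 0, (0:Int)) = ((0:Int), (0:Int)) by simp] at key
    rw [key, ← trail]
    have : ∀ a b : Int, (if b > a then b else a) = max a b := by intro a b; omega
    simp [this]
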